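-- pv_equiv track=rewrite | github.com/AfikEschel/mRNA-Fold | src/mrnafold/metrics.py | structure_to_base_pairs
-- ===== SOURCE A (Python) =====
-- from typing import List, Tuple
--
-- def structure_to_base_pairs(dot_bracket: str) -> List[Tuple[int, int]]:
--     """
--     Convert dot-bracket notation to list of base pairs.
--
--     Args:
--         dot_bracket: Structure in dot-bracket notation
--
--     Returns:
--         List of (i,j) base pairs (0-based indexing)
--     """
--     base_pairs = []
--     stack = []
--
--     for i, char in enumerate(dot_bracket):
--         if char == '(':
--             stack.append(i)
--         elif char == ')':
--             if stack:
--                 j = stack.pop()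
--                 base_pairs.append((j, i))
--
--     return sorted(base_pairs)
-- ===== SOURCE B (Python) =====
-- def structure_to_base_pairs(dot_bracket):
--     """Divide and conquer: each segment yields (pairs sorted by opening index,
--     unmatched opener indices ascending, unmatched closer indices ascending);
--     two halves merge by matching the left half's deepest unmatched openers with
--     the right half's earliest unmatched closers, so no stack and no final sort."""
--     def solve(lo, hi):
--         if hi - lo == 0:
--             return [], [], []
--         if hi - lo == 1:
--             c = dot_bracket[lo]
--             if c == '(':
--                 return [], [lo], []
--             if c == ')':
--                 return [], [], [lo]
--             return [], [], []
--         mid = (lo + hi) // 2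
--         pl, ol, cl = solve(lo, mid)
--         pr, orr, cr = solve(mid, hi)
--         k = min(len(ol), len(cr))
--         new = list(zip(ol[len(ol) - k:], cr[:k][::-1]))
--         # merge pl and new, both ascending in opening index
--         merged = []
--         a = b = 0
--         while a < len(pl) and b < len(new):
--             if pl[a][0] < new[b][0]:
--                 merged.append(pl[a]); a += 1
--             else:
--                 merged.append(new[b]); b += 1
--         merged.extend(pl[a:])
--         merged.extend(new[b:])
--         return merged + pr, ol[:len(ol) - k] + orr, cl + cr[k:]
--
--     return solve(0, len(dot_bracket))[0]
-- ===== Notes on version B (the rewrite author's own statement) =====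
-- stated objective: alternative
-- what changed: Replaces the left-to-right stack scan plus final sort with a divide-and-conquer: each half independently yields its pairs (already ordered by opening index) plus its ascending index lists of unmatched openers and closers, and halves merge by pairing the left half's deepest unmatched openers with the right half's earliest unmatched closers, so there is no stack and no sort.
import Mathlib
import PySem

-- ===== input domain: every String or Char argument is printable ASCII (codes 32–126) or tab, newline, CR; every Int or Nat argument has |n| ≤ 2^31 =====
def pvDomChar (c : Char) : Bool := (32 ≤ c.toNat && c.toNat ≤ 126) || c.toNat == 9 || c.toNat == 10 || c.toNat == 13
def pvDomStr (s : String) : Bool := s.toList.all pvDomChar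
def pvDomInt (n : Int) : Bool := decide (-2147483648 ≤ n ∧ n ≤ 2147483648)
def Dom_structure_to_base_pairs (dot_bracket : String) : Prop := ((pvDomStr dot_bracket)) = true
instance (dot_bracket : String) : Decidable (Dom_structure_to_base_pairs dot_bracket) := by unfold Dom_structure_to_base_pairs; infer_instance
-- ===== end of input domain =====

-- B replaces A's left-to-right stack scan plus final sort by a divide-and-conquer
-- bracket matching whose merge pairs the left half's deepest unmatched openers with
-- the right half's earliest unmatched closers (objective: alternative algorithm).


-- ===== PORT A =====
-- loop body of A: state = (base_pairs, stack); stack top at the head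
def pvStepA (st : List (Int × Int) × List Int) (p : Int × Char) : List (Int × Int) × List Int :=
  if p.2 = '(' then (st.1, p.1 :: st.2)
  else if p.2 = ')' then
    match st.2 with
    | [] => st
    | j :: rest => (st.1 ++ [(j, p.1)], rest)
  else st

def structure_to_base_pairs (dot_bracket : String) : List (Int × Int) :=
  let st := (PySem.List.enumerate dot_bracket.toList).foldl pvStepA ([], [])
  PySem.List.sorted2 st.1 (fun p => p.1) (fun p => p.2)

-- ===== PORT B =====
-- B's two-pointer merge loop over pl and new, as structural recursion on the same comparison
def pvMerge : List (Int × Int) → List (Int × Int) → List (Int × Int)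
  | [], ys => ys
  | x :: xs, [] => x :: xs
  | x :: xs, y :: ys =>
    if x.1 < y.1 then x :: pvMerge xs (y :: ys) else y :: pvMerge (x :: xs) ys
termination_by xs ys => xs.length + ys.length

-- B's solve(lo, hi) ported on the segment's character list plus its start index lo;
-- Python's mid = (lo+hi)//2 gives a left part of (hi-lo)//2 characters, i.e. take (length/2)
def pvSolve : List Char → Int → List (Int × Int) × List Int × List Int
  | [], _ => ([], [], [])
  | [c], lo =>
    if c = '(' then ([], [lo], [])
    else if c = ')' then ([], [], [lo])
    else ([], [], [])
  | c1 :: c2 :: rest, lo =>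
    let m := (c1 :: c2 :: rest).length / 2
    let L := pvSolve ((c1 :: c2 :: rest).take m) lo
    let R := pvSolve ((c1 :: c2 :: rest).drop m) (lo + (m : Int))
    let k := min L.2.1.length R.2.2.length
    let news := List.zip (L.2.1.drop (L.2.1.length - k)) ((R.2.2.take k).reverse)
    (pvMerge L.1 news ++ R.1,
      (L.2.1.take (L.2.1.length - k) ++ R.2.1, L.2.2 ++ R.2.2.drop k))
termination_by cs _ => cs.length
decreasing_by
  all_goals simp_all [List.length_take, List.length_drop]
  all_goals omega

def structure_to_base_pairs_alt (dot_bracket : String) : List (Int × Int) :=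
  (pvSolve dot_bracket.toList 0).1

-- ===== PRECONDITION & SPEC =====
def Spec_structure_to_base_pairs (dot_bracket : String) (out : List (Int × Int)) : Prop := out = structure_to_base_pairs_alt dot_bracket
instance (dot_bracket : String) (out : List (Int × Int)) : Decidable (Spec_structure_to_base_pairs dot_bracket out) := by unfold Spec_structure_to_base_pairs; infer_instance

-- ===== CLAIM (what is proved, stated in full; the proofs are below) =====
def Claim_equal_structure_to_base_pairs : Prop := ∀ (dot_bracket : String), Dom_structure_to_base_pairs dot_bracket → Spec_structure_to_base_pairs dot_bracket (structure_to_base_pairs dot_bracket)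

-- ===== LEMMAS AND PROOFS =====

-- zip bookkeeping (zip truncates to the shorter list)
lemma pvZip_take_left {α β : Type} (as : List α) (bs : List β) :
    as.zip bs = (as.take bs.length).zip bs := by
  induction as generalizing bs with
  | nil => simp
  | cons a as ih =>
    cases bs with
    | nil => simp
    | cons b bs =>
      simp only [List.zip_cons_cons, List.length_cons, List.take_succ_cons]
      rw [← ih bs]

lemma pvZip_append_left {α β : Type} (as bs : List α) (cs : List β) :
    (as ++ bs).zip cs = as.zip (cs.take as.length) ++ bs.zip (cs.drop as.length) := by
  induction as generalizing cs with
  | nil => simp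
  | cons a as ih =>
    cases cs with
    | nil => simp
    | cons c cs => simp [List.zip_cons_cons, ih]

lemma pvZip_append_right {α β : Type} (as : List α) (bs cs : List β) :
    as.zip (bs ++ cs) = (as.take bs.length).zip bs ++ (as.drop bs.length).zip cs := by
  induction bs generalizing as with
  | nil => simp
  | cons b bs ih =>
    cases as with
    | nil => simp
    | cons a as => simp [List.zip_cons_cons, ih]

lemma pvZip_reverse {α β : Type} (as : List α) (bs : List β) (h : as.length = bs.length) :
    (as.zip bs).reverse = as.reverse.zip bs.reverse := by
  induction as generalizing bs with
  | nil => simp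
  | cons a as ih =>
    cases bs with
    | nil => simp at h
    | cons b bs =>
      simp only [List.length_cons, Nat.succ.injEq] at h
      simp only [List.zip_cons_cons, List.reverse_cons]
      rw [List.zip_append (by simp [h]), ih bs h]
      rfl

-- membership and order facts about pvMerge
lemma pvMerge_mem (xs ys : List (Int × Int)) (p : Int × Int) :
    p ∈ pvMerge xs ys ↔ p ∈ xs ∨ p ∈ ys := by
  induction xs, ys using pvMerge.induct with
  | case1 ys => simp [pvMerge]
  | case2 x xs => simp [pvMerge]
  | case3 x xs y ys h ih => simp [pvMerge, h, ih]; tauto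
  | case4 x xs y ys h ih => simp [pvMerge, h, ih]; tauto

lemma pvMerge_perm (xs ys : List (Int × Int)) :
    (pvMerge xs ys).Perm (xs ++ ys) := by
  induction xs, ys using pvMerge.induct with
  | case1 ys => simp [pvMerge]
  | case2 x xs => simp [pvMerge]
  | case3 x xs y ys h ih => simpa [pvMerge, h] using ih.cons x
  | case4 x xs y ys h ih =>
    simp only [pvMerge, h, if_false]
    exact (ih.cons y).trans List.perm_middle.symm

lemma pvMerge_pairwise (xs ys : List (Int × Int))
    (hx : xs.Pairwise (fun a b => a.1 < b.1)) (hy : ys.Pairwise (fun a b => a.1 < b.1))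
    (hne : ∀ a ∈ xs, ∀ b ∈ ys, a.1 ≠ b.1) :
    (pvMerge xs ys).Pairwise (fun a b => a.1 < b.1) := by
  induction xs, ys using pvMerge.induct with
  | case1 ys => simpa [pvMerge] using hy
  | case2 x xs => simpa [pvMerge] using hx
  | case3 x xs y ys h ih =>
    simp only [pvMerge, h, if_true]
    refine List.pairwise_cons.mpr ⟨?_, ?_⟩
    · intro p hp
      rcases (pvMerge_mem _ _ _).mp hp with hp | hp
      · exact (List.pairwise_cons.mp hx).1 p hp
      · rcases List.mem_cons.mp hp with rfl | hp
        · exact h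
        · exact lt_trans h ((List.pairwise_cons.mp hy).1 p hp)
    · exact ih (List.pairwise_cons.mp hx).2 hy
        (fun a ha b hb => hne a (List.mem_cons_of_mem x ha) b hb)
  | case4 x xs y ys h ih =>
    simp only [pvMerge, h, if_false]
    have hyx : y.1 < x.1 :=
      lt_of_le_of_ne (not_lt.mp h) (Ne.symm (hne x List.mem_cons_self y List.mem_cons_self))
    refine List.pairwise_cons.mpr ⟨?_, ?_⟩
    · intro p hp
      rcases (pvMerge_mem _ _ _).mp hp with hp | hp
      · rcases List.mem_cons.mp hp with rfl | hp
        · exact hyx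
        · exact lt_trans hyx ((List.pairwise_cons.mp hx).1 p hp)
      · exact (List.pairwise_cons.mp hy).1 p hp
    · exact ih hx (List.pairwise_cons.mp hy).2
        (fun a ha b hb => hne a ha b (List.mem_cons_of_mem y hb))

-- (zip as bs) is strictly increasing in fst when as is
lemma pvZip_pairwise_fst {β : Type} (as : List Int) (bs : List β)
    (h : as.Pairwise (· < ·)) :
    (as.zip bs).Pairwise (fun a b => a.1 < b.1) := by
  induction as generalizing bs with
  | nil => simp
  | cons a as ih =>
    cases bs with
    | nil => simp
    | cons b bs =>
      simp only [List.zip_cons_cons, List.pairwise_cons]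
      refine ⟨?_, ih bs h.of_cons⟩
      intro p hp
      have := (List.of_mem_zip hp).1
      exact (List.pairwise_cons.mp h).1 _ this

-- unfolding equation for the recursive case of pvSolve
lemma pvSolve_cons2 (c1 c2 : Char) (rest : List Char) (lo : Int) :
    pvSolve (c1 :: c2 :: rest) lo =
      (let m := (c1 :: c2 :: rest).length / 2
       let L := pvSolve ((c1 :: c2 :: rest).take m) lo
       let R := pvSolve ((c1 :: c2 :: rest).drop m) (lo + (m : Int))
       let k := min L.2.1.length R.2.2.length
       let news := List.zip (L.2.1.drop (L.2.1.length - k)) ((R.2.2.take k).reverse)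
       (pvMerge L.1 news ++ R.1,
         (L.2.1.take (L.2.1.length - k) ++ R.2.1, L.2.2 ++ R.2.2.drop k))) := by
  simp only [pvSolve]

-- main invariant: folding A's loop body over a segment, from any accumulated pairs P and
-- stack S, leaves the stack and (up to permutation) the pairs that pvSolve describes
lemma pvMain (cs : List Char) (lo : Int) : ∀ (P : List (Int × Int)) (S : List Int),
    ((PySem.List.enumerate cs lo).foldl pvStepA (P, S)).2
      = (pvSolve cs lo).2.1.reverse ++ S.drop (pvSolve cs lo).2.2.length
    ∧ ((PySem.List.enumerate cs lo).foldl pvStepA (P, S)).1.Perm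
        (P ++ (pvSolve cs lo).1 ++ S.zip (pvSolve cs lo).2.2) := by
  induction cs, lo using pvSolve.induct with
  | case1 lo =>
    intro P S
    simp [pvSolve, PySem.List.enumerate_nil]
  | case2 lo =>
    intro P S
    simp [pvSolve, pvStepA, PySem.List.enumerate_cons, PySem.List.enumerate_nil]
  | case3 lo h =>
    intro P S
    cases S with
    | nil => simp [pvSolve, pvStepA, PySem.List.enumerate_cons, PySem.List.enumerate_nil]
    | cons j rest =>
      simp [pvSolve, pvStepA, PySem.List.enumerate_cons, PySem.List.enumerate_nil]
  | case4 c lo h1 h2 =>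
    intro P S
    simp [pvSolve, pvStepA, h1, h2, PySem.List.enumerate_cons, PySem.List.enumerate_nil]
  | case5 c1 c2 rest lo m0 ihL ihR =>
    intro P S
    have hm0 : m0 = (c1 :: c2 :: rest).length / 2 := rfl
    rw [hm0] at ihL ihR
    simp only [pvSolve_cons2]
    set m := (c1 :: c2 :: rest).length / 2 with hm
    set L := pvSolve ((c1 :: c2 :: rest).take m) lo with hLdef
    set R := pvSolve ((c1 :: c2 :: rest).drop m) (lo + (m : Int)) with hRdef
    set k := min L.2.1.length R.2.2.length with hk
    set news := List.zip (L.2.1.drop (L.2.1.length - k)) ((R.2.2.take k).reverse) with hnews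
    have hmle : m ≤ (c1 :: c2 :: rest).length := Nat.div_le_self _ _
    have henum : PySem.List.enumerate (c1 :: c2 :: rest) lo
        = PySem.List.enumerate ((c1 :: c2 :: rest).take m) lo
          ++ PySem.List.enumerate ((c1 :: c2 :: rest).drop m) (lo + (m : Int)) := by
      conv_lhs => rw [← List.take_append_drop m (c1 :: c2 :: rest)]
      rw [PySem.List.enumerate_append, List.length_take, Nat.min_eq_left hmle]
    rw [henum, List.foldl_append]
    set st1 := (PySem.List.enumerate ((c1 :: c2 :: rest).take m) lo).foldl pvStepA (P, S) with hst1
    obtain ⟨hL2, hL1⟩ := ihL P S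
    rw [← hst1] at hL2 hL1
    obtain ⟨hR2, hR1⟩ := ihR st1.1 st1.2
    rw [Prod.mk.eta] at hR2 hR1
    -- the lengths involved
    have hkl : k ≤ L.2.1.length := Nat.min_le_left _ _
    have hkr : k ≤ R.2.2.length := Nat.min_le_right _ _
    -- rewriting the zip over the intermediate stack
    have htk : R.2.2.take L.2.1.length = R.2.2.take k := by
      rcases Nat.le_total L.2.1.length R.2.2.length with h | h
      · have : k = L.2.1.length := Nat.min_eq_left h
        rw [this]
      · rw [List.take_of_length_le h, List.take_of_length_le (by omega)]
    have hdr : R.2.2.drop L.2.1.length = R.2.2.drop k := by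
      rcases Nat.le_total L.2.1.length R.2.2.length with h | h
      · have : k = L.2.1.length := Nat.min_eq_left h
        rw [this]
      · rw [List.drop_of_length_le h, List.drop_of_length_le (by omega)]
    have hzip : st1.2.zip R.2.2
        = news.reverse ++ (S.drop L.2.2.length).zip (R.2.2.drop k) := by
      rw [hL2, pvZip_append_left, List.length_reverse, htk, hdr]
      congr 1
      · rw [pvZip_take_left (L.2.1.reverse) (R.2.2.take k),
          List.length_take, Nat.min_eq_left hkr, List.take_reverse, hnews,
          pvZip_reverse _ _ (by simp [List.length_take, Nat.min_eq_left hkr]; omega),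
          List.reverse_reverse]
    constructor
    · -- the stack
      rw [hR2, hL2, List.drop_append, List.drop_reverse, List.drop_drop,
        List.reverse_append, List.length_reverse]
      have e1 : L.2.1.length - R.2.2.length = L.2.1.length - k := by omega
      have e2 : L.2.2.length + (R.2.2.length - L.2.1.length)
          = (L.2.2 ++ R.2.2.drop k).length := by
        simp [List.length_append, List.length_drop]
        omega
      rw [e1, e2]
      simp
    · -- the pairs, by counting
      rw [List.perm_iff_count]
      intro x
      have hc1 := hL1.count_eq x
      have hc2 := hR1.count_eq x
      have hc3 := (pvMerge_perm L.1 news).count_eq x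
      have hgoalzip : S.zip (L.2.2 ++ R.2.2.drop k)
          = S.zip L.2.2 ++ (S.drop L.2.2.length).zip (R.2.2.drop k) := by
        rw [pvZip_append_right, ← pvZip_take_left]
      rw [hzip] at hc2
      rw [hgoalzip]
      simp only [List.count_append, List.count_reverse] at hc1 hc2 hc3 ⊢
      omega

-- order and bound invariant of pvSolve's output
lemma pvSorted (cs : List Char) (lo : Int) :
    (pvSolve cs lo).1.Pairwise (fun a b => a.1 < b.1)
    ∧ (pvSolve cs lo).2.1.Pairwise (· < ·)
    ∧ (∀ p ∈ (pvSolve cs lo).1, lo ≤ p.1 ∧ p.1 < lo + cs.length)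
    ∧ (∀ x ∈ (pvSolve cs lo).2.1, lo ≤ x ∧ x < lo + cs.length)
    ∧ (∀ p ∈ (pvSolve cs lo).1, p.1 ∉ (pvSolve cs lo).2.1) := by
  induction cs, lo using pvSolve.induct with
  | case1 lo => simp [pvSolve]
  | case2 lo => simp [pvSolve]
  | case3 lo h => simp [pvSolve, h]
  | case4 c lo h1 h2 => simp [pvSolve, h1, h2]
  | case5 c1 c2 rest lo m0 ihL ihR =>
    have hm0 : m0 = (c1 :: c2 :: rest).length / 2 := rfl
    rw [hm0] at ihL ihR
    simp only [pvSolve_cons2]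
    set m := (c1 :: c2 :: rest).length / 2 with hm
    set L := pvSolve ((c1 :: c2 :: rest).take m) lo with hLdef
    set R := pvSolve ((c1 :: c2 :: rest).drop m) (lo + (m : Int)) with hRdef
    set k := min L.2.1.length R.2.2.length with hk
    set news := List.zip (L.2.1.drop (L.2.1.length - k)) ((R.2.2.take k).reverse) with hnews
    have hmle : m ≤ (c1 :: c2 :: rest).length := Nat.div_le_self _ _
    have hlt : ((c1 :: c2 :: rest).take m).length = m := by
      rw [List.length_take, Nat.min_eq_left hmle]
    have hld : ((c1 :: c2 :: rest).drop m).length = (c1 :: c2 :: rest).length - m :=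
      List.length_drop
    obtain ⟨pL, oL, bPL, bOL, dL⟩ := ihL
    obtain ⟨pR, oR, bPR, bOR, dR⟩ := ihR
    rw [hlt] at bPL bOL
    rw [hld] at bPR bOR
    -- facts about the freshly matched pairs
    have hnews_pw : news.Pairwise (fun a b => a.1 < b.1) :=
      pvZip_pairwise_fst _ _ (oL.sublist (List.drop_sublist _ _))
    have hnews_fst : ∀ p ∈ news, p.1 ∈ L.2.1 := by
      intro p hp
      exact List.mem_of_mem_drop (List.of_mem_zip hp).1
    have hdisj : ∀ a ∈ L.1, ∀ b ∈ news, a.1 ≠ b.1 := by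
      intro a ha b hb heq
      exact dL a ha (heq ▸ hnews_fst b hb)
    have hmer_pw : (pvMerge L.1 news).Pairwise (fun a b => a.1 < b.1) :=
      pvMerge_pairwise _ _ pL hnews_pw hdisj
    have hmer_bnd : ∀ p ∈ pvMerge L.1 news, lo ≤ p.1 ∧ p.1 < lo + (m : Int) := by
      intro p hp
      rcases (pvMerge_mem _ _ _).mp hp with hp | hp
      · exact bPL p hp
      · exact bOL _ (hnews_fst p hp)
    have hcast : ((c1 :: c2 :: rest).length : Int) = (m : Int) + ((c1 :: c2 :: rest).length - m : Nat) := by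
      omega
    refine ⟨?_, ?_, ?_, ?_, ?_⟩
    · -- pairs pairwise increasing in fst
      refine List.pairwise_append.mpr ⟨hmer_pw, pR, ?_⟩
      intro a ha b hb
      exact lt_of_lt_of_le (hmer_bnd a ha).2 (bPR b hb).1
    · -- unmatched openers increasing
      refine List.pairwise_append.mpr ⟨oL.sublist (List.take_sublist _ _), oR, ?_⟩
      intro a ha b hb
      exact lt_of_lt_of_le (bOL a (List.mem_of_mem_take ha)).2 (bOR b hb).1
    · -- pair bounds
      intro p hp
      rcases List.mem_append.mp hp with hp | hp
      · have := hmer_bnd p hp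
        constructor
        · exact this.1
        · rw [hcast]; omega
      · have := bPR p hp
        constructor
        · omega
        · rw [hcast]; omega
    · -- opener bounds
      intro x hx
      rcases List.mem_append.mp hx with hx | hx
      · have := bOL x (List.mem_of_mem_take hx)
        constructor
        · exact this.1
        · rw [hcast]; omega
      · have := bOR x hx
        constructor
        · omega
        · rw [hcast]; omega
    · -- matched openers are not unmatched openers
      have hnodup : L.2.1.Nodup := oL.imp ne_of_lt
      have hdisjTD : ∀ y ∈ L.2.1.drop (L.2.1.length - k), y ∉ L.2.1.take (L.2.1.length - k) := by
        intro y hy hyT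
        have := hnodup
        rw [← List.take_append_drop (L.2.1.length - k) L.2.1, List.nodup_append] at this
        exact this.2.2 y hyT y hy rfl
      intro p hp hpo
      rcases List.mem_append.mp hp with hp | hp
      · rcases (pvMerge_mem _ _ _).mp hp with hp | hp
        · -- matched inside the left half
          rcases List.mem_append.mp hpo with hpo | hpo
          · exact dL p hp (List.mem_of_mem_take hpo)
          · have h1 := (bPL p hp).2
            have h2 := (bOR _ hpo).1
            omega
        · -- freshly matched openers
          rcases List.mem_append.mp hpo with hpo | hpo
          · exact hdisjTD p.1 (List.of_mem_zip hp).1 hpo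
          · have h1 := (bOL _ (hnews_fst p hp)).2
            have h2 := (bOR _ hpo).1
            omega
      · rcases List.mem_append.mp hpo with hpo | hpo
        · have h1 := (bOL _ (List.mem_of_mem_take hpo)).2
          have h2 := (bPR p hp).1
          omega
        · exact dR p hp hpo

-- insertBy with pointwise-agreeing comparators is the same insertion
lemma pvInsertBy_congr {α : Type} (f g : α → α → Bool) (x : α) (ys : List α)
    (h : ∀ y ∈ ys, f x y = g x y) :
    PySem.List.insertBy f x ys = PySem.List.insertBy g x ys := by
  induction ys with
  | nil => rfl
  | cons y ys ih =>
    simp only [PySem.List.insertBy]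
    rw [h y List.mem_cons_self]
    by_cases hg : g x y = true
    · simp [hg]
    · simp only [Bool.not_eq_true] at hg
      simp [hg, ih (fun z hz => h z (List.mem_cons_of_mem y hz))]

lemma pvFoldl_insertBy_congr {α : Type} (f g : α → α → Bool) (xs : List α) :
    ∀ (acc : List α), (∀ a b : α, (a ∈ xs ∨ a ∈ acc) → (b ∈ xs ∨ b ∈ acc) → f a b = g a b) →
    xs.foldl (fun acc x => PySem.List.insertBy f x acc) acc
      = xs.foldl (fun acc x => PySem.List.insertBy g x acc) acc := by
  induction xs with
  | nil => intro acc _; rfl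
  | cons x xs ih =>
    intro acc h
    simp only [List.foldl_cons]
    rw [pvInsertBy_congr f g x acc (fun y hy =>
      h x y (Or.inl List.mem_cons_self) (Or.inr hy))]
    apply ih
    intro a b ha hb
    have hmem : ∀ z : α, (z ∈ xs ∨ z ∈ PySem.List.insertBy g x acc) → (z ∈ x :: xs ∨ z ∈ acc) := by
      intro z hz
      rcases hz with hz | hz
      · exact Or.inl (List.mem_cons_of_mem x hz)
      · rcases (PySem.List.mem_insertBy g x z acc).mp hz with rfl | hz
        · exact Or.inl List.mem_cons_self
        · exact Or.inr hz
    exact h a b (hmem a ha) (hmem b hb)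

-- with pairwise-distinct first components, Python's tuple sort is the sort by first component
lemma pvSorted2_eq_sorted_fst (xs : List (Int × Int))
    (hinj : ∀ a ∈ xs, ∀ b ∈ xs, Prod.fst a = Prod.fst b → a = b) :
    PySem.List.sorted2 xs (fun p => p.1) (fun p => p.2)
      = PySem.List.sorted xs (fun p => p.1) := by
  show xs.foldl (fun acc x => PySem.List.insertBy _ x acc) []
      = xs.foldl (fun acc x => PySem.List.insertBy _ x acc) []
  apply pvFoldl_insertBy_congr
  intro a b ha hb
  simp only [List.not_mem_nil, or_false] at ha hb
  rcases lt_trichotomy a.1 b.1 with hlt | heq | hgt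
  · simp [hlt, not_lt_of_gt hlt]
  · have : a = b := hinj a ha b hb heq
    subst this
    simp
  · simp [hgt, not_lt_of_gt hgt]

-- ===== VERDICT (by name: the statement is the Claim_ definition above) =====
theorem structure_to_base_pairs_spec : Claim_equal_structure_to_base_pairs := by
  intro s _
  unfold Spec_structure_to_base_pairs structure_to_base_pairs structure_to_base_pairs_alt
  simp only []
  obtain ⟨hstk, hperm⟩ := pvMain s.toList 0 [] []
  obtain ⟨hps, _, _, _, _⟩ := pvSorted s.toList 0
  have hperm' : ((PySem.List.enumerate s.toList 0).foldl pvStepA ([], [])).1.Perm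
      (pvSolve s.toList 0).1 := by simpa using hperm
  have hinj : ∀ p ∈ ((PySem.List.enumerate s.toList 0).foldl pvStepA ([], [])).1,
      ∀ q ∈ ((PySem.List.enumerate s.toList 0).foldl pvStepA ([], [])).1,
      Prod.fst p = Prod.fst q → p = q := by
    have hnd : ((pvSolve s.toList 0).1.map Prod.fst).Nodup :=
      ((List.pairwise_map).mpr hps).imp fun h => ne_of_lt h
    intro p hp q hq
    exact List.inj_on_of_nodup_map hnd (hperm'.mem_iff.mp hp) (hperm'.mem_iff.mp hq)
  rw [pvSorted2_eq_sorted_fst _ hinj]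
  exact PySem.List.sorted_eq_of_perm_of_pairwise_lt _ _ _ hperm'.symm hps
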